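-- pv_equiv track=rewrite | github.com/bharadwajvyadavalli/coding_markdowns | advanced_algorithms_complete.py | apartment_hunting
-- ===== SOURCE A (Python) =====
-- from typing import List, Dict, Set, Tuple, Optional
--
-- def apartment_hunting(blocks: List[Dict[str, bool]], reqs: List[str]) -> int:
--     """
--     Apartment Hunting Problem
--
--     Find the optimal block to live in that minimizes the maximum distance to all required amenities.
--
--     Args:
--         blocks: List of dictionaries where each dict represents a block and contains
--                boolean values for each amenity (True if present, False if not)
--         reqs: List of required amenities
--
--     Returns:
--         Index of the optimal block to live in
--
--     Time Complexity: O(B * R) where B = number of blocks, R = number of requirements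
--     Space Complexity: O(B * R) for storing distances
--     """
--     if not blocks or not reqs:
--         return 0
--
--     num_blocks = len(blocks)
--     num_reqs = len(reqs)
--
--     # For each requirement, find the minimum distance to each block
--     min_distances = [[float('inf')] * num_blocks for _ in range(num_reqs)]
--
--     # For each requirement
--     for req_idx, req in enumerate(reqs):
--         # Find blocks that have this requirement
--         blocks_with_req = []
--         for block_idx, block in enumerate(blocks):
--             if block.get(req, False):
--                 blocks_with_req.append(block_idx)
--
--         # Calculate minimum distance from each block to this requirement
--         for block_idx in range(num_blocks):
--             min_dist = float('inf')
--             for req_block_idx in blocks_with_req: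
--                 min_dist = min(min_dist, abs(block_idx - req_block_idx))
--             min_distances[req_idx][block_idx] = min_dist
--
--     # Find the block with minimum maximum distance
--     optimal_block = 0
--     min_max_distance = float('inf')
--
--     for block_idx in range(num_blocks):
--         max_distance = max(min_distances[req_idx][block_idx] for req_idx in range(num_reqs))
--         if max_distance < min_max_distance:
--             min_max_distance = max_distance
--             optimal_block = block_idx
--
--     return optimal_block
-- ===== SOURCE B (Python) =====
-- def _nearest(has, INF):
--     # nearest-True distances by a forward and a backward capped scan
--     fwd = []
--     ap = fwd.append
--     cur = INF
--     for h in has: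
--         if h:
--             cur = 0
--         elif cur < INF:
--             cur += 1
--         ap(cur)
--     bwd = []
--     ap = bwd.append
--     cur = INF
--     for h in reversed(has):
--         if h:
--             cur = 0
--         elif cur < INF:
--             cur += 1
--         ap(cur)
--     bwd.reverse()
--     return list(map(min, fwd, bwd))
--
-- def apartment_hunting(blocks, reqs):
--     if not blocks or not reqs:
--         return 0
--     n = len(blocks)
--     INF = n  # strictly larger than any real distance
--     maxd = [0] * n
--     for req in reqs:
--         has = [b.get(req, False) for b in blocks]
--         dist = _nearest(has, INF)
--         maxd = list(map(max, maxd, dist))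
--     best = 0
--     for i in range(1, n):
--         if maxd[i] < maxd[best]:
--             best = i
--     return best
-- ===== Notes on version B (the rewrite author's own statement) =====
-- stated objective: alternative
-- what changed: Instead of A's per-requirement collection of all blocks having the amenity followed by a nested min-distance scan over every (block, amenity-block) pair, B computes each requirement's nearest-amenity distances with one capped forward sweep and one capped backward sweep, folding a running per-block maximum.
import Mathlib
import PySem

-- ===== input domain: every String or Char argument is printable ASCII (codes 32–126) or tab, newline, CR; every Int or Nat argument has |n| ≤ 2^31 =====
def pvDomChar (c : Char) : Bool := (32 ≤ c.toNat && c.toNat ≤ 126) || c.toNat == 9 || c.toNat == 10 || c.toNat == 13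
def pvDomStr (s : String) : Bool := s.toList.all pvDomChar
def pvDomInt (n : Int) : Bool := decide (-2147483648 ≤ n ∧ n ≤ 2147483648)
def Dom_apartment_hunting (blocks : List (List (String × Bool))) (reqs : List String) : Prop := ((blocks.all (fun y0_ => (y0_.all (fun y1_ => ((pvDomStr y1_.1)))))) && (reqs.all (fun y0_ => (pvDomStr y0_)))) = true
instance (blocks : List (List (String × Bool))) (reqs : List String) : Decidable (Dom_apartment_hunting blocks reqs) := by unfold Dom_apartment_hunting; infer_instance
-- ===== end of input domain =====

-- B replaces A's per-requirement nested min-distance scan over blocks by two capped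
-- left/right sweeps per requirement plus a running per-block maximum (objective: alternative).


-- ===== PORT A =====
-- A works with float('inf') alongside ints; ported by hand as Option Int with none = inf
-- (exact: min/max/< with none behave as Python's with inf).
def ahO_min : Option Int → Option Int → Option Int
  | none, b => b
  | some x, none => some x
  | some x, some y => some (min x y)

def ahO_max : Option Int → Option Int → Option Int
  | none, _ => none
  | some _, none => none
  | some x, some y => some (max x y)

-- max(iterable) over a nonempty sequence: fold from the first element
def ahO_maxList : List (Option Int) → Option Int
  | [] => none
  | x :: t => t.foldl ahO_max x

def ahO_lt : Option Int → Option Int → Bool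
  | none, _ => false
  | some _, none => true
  | some x, some y => decide (x < y)

-- the 'blocks_with_req' accumulation loop
def ah_blocksWith (blocks : List (List (String × Bool))) (req : String) : List Nat :=
  (PySem.List.enumerate blocks 0).foldl
    (fun acc p => if (p.2.lookup req).getD false then acc ++ [p.1.toNat] else acc) []

-- the inner 'min_dist' loop for one block index
def ah_minDist (bw : List Nat) (i : Nat) : Option Int :=
  bw.foldl (fun m (j : Nat) => ahO_min m (some |(i : Int) - (j : Int)|)) none

def apartment_hunting (blocks : List (List (String × Bool))) (reqs : List String) : Int :=
  if blocks = [] ∨ reqs = [] then 0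
  else
    let numBlocks := blocks.length
    let numReqs := reqs.length
    let minDistances : List (List (Option Int)) :=
      reqs.map (fun req =>
        let bw := ah_blocksWith blocks req
        (List.range numBlocks).map (fun i => ah_minDist bw i))
    let fin := (List.range numBlocks).foldl
      (fun (st : Int × Option Int) i =>
        let maxD := ahO_maxList
          ((List.range numReqs).map (fun r => (minDistances.getD r []).getD i none))
        if ahO_lt maxD st.2 then ((i : Int), maxD) else st)
      (0, none)
    fin.1

-- ===== PORT B =====
-- one capped nearest-True scan ('cur' starts at INF and is capped there)
def ahB_scan (has : List Bool) (INF : Int) : List Int :=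
  (has.foldl
    (fun (st : List Int × Int) h =>
      let cur := if h then 0 else (if st.2 < INF then st.2 + 1 else INF)
      (st.1 ++ [cur], cur))
    ([], INF)).1

def ahB_nearest (has : List Bool) (INF : Int) : List Int :=
  List.zipWith min (ahB_scan has INF) (ahB_scan has.reverse INF).reverse

def apartment_hunting_alt (blocks : List (List (String × Bool))) (reqs : List String) : Int :=
  if blocks = [] ∨ reqs = [] then 0
  else
    let n := blocks.length
    let INF : Int := (n : Int)
    let maxd := reqs.foldl
      (fun maxd req =>
        let has := blocks.map (fun b => (b.lookup req).getD false)
        List.zipWith max maxd (ahB_nearest has INF))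
      (List.replicate n (0 : Int))
    (PySem.List.pyRange 1 (n : Int) 1).foldl
      (fun best i =>
        if PySem.List.pyGetD maxd i 0 < PySem.List.pyGetD maxd best 0 then i else best)
      0

-- ===== PRECONDITION & SPEC =====
def Spec_apartment_hunting (blocks : List (List (String × Bool))) (reqs : List String) (out : Int) : Prop := out = apartment_hunting_alt blocks reqs
instance (blocks : List (List (String × Bool))) (reqs : List String) (out : Int) : Decidable (Spec_apartment_hunting blocks reqs out) := by unfold Spec_apartment_hunting; infer_instance

-- ===== CLAIM (what is proved, stated in full; the proofs are below) =====
def Claim_equal_apartment_hunting : Prop := ∀ (blocks : List (List (String × Bool))) (reqs : List String), Dom_apartment_hunting blocks reqs → Spec_apartment_hunting blocks reqs (apartment_hunting blocks reqs)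

-- ===== LEMMAS AND PROOFS =====

-- ---- B's scan re-expressed as a structural recursion ----
def ahB_scanRec (INF : Int) : Int → List Bool → List Int
  | _, [] => []
  | cur, h :: t =>
      let c := if h then 0 else if cur < INF then cur + 1 else INF
      c :: ahB_scanRec INF c t

theorem scan_foldl_eq (INF : Int) (t : List Bool) (acc : List Int) (cur : Int) :
    (t.foldl
      (fun (st : List Int × Int) h =>
        let c := if h then 0 else (if st.2 < INF then st.2 + 1 else INF)
        (st.1 ++ [c], c)) (acc, cur)).1 = acc ++ ahB_scanRec INF cur t := by
  induction t generalizing acc cur with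
  | nil => simp [ahB_scanRec]
  | cons h t ih => simp [ahB_scanRec, List.foldl_cons, ih]

theorem scan_eq_rec (has : List Bool) (INF : Int) :
    ahB_scan has INF = ahB_scanRec INF INF has := by
  simpa using scan_foldl_eq INF has [] INF

theorem length_scanRec (INF cur : Int) (t : List Bool) :
    (ahB_scanRec INF cur t).length = t.length := by
  induction t generalizing cur with
  | nil => rfl
  | cons h t ih => simp [ahB_scanRec, ih]

theorem scanRec_bounds (INF : Int) (t : List Bool) :
    ∀ (cur : Int), 0 ≤ cur → cur ≤ INF → ∀ i < t.length,
      0 ≤ (ahB_scanRec INF cur t).getD i 0 ∧ (ahB_scanRec INF cur t).getD i 0 ≤ INF := by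
  induction t with
  | nil => intro cur _ _ i hi; simp at hi
  | cons h t ih =>
    intro cur h0 hc i hi
    match i with
    | 0 =>
      simp only [ahB_scanRec, List.getD_cons_zero]
      split_ifs <;> constructor <;> omega
    | Nat.succ i =>
      simp only [ahB_scanRec, List.getD_cons_succ]
      have hi' : i < t.length := by simpa using hi
      refine ih _ ?_ ?_ i hi' <;> split_ifs <;> omega

theorem scanRec_ub_carry (INF : Int) (t : List Bool) :
    ∀ (cur : Int), 0 ≤ cur → 0 ≤ INF → ∀ i < t.length,
      (ahB_scanRec INF cur t).getD i 0 ≤ cur + 1 + i := by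
  induction t with
  | nil => intro cur _ _ i hi; simp at hi
  | cons h t ih =>
    intro cur h0 hINF i hi
    match i with
    | 0 =>
      simp only [ahB_scanRec, List.getD_cons_zero]
      split_ifs <;> omega
    | Nat.succ i =>
      simp only [ahB_scanRec, List.getD_cons_succ]
      have hi' : i < t.length := by simpa using hi
      have hcur : (0:Int) ≤ (if h then 0 else if cur < INF then cur + 1 else INF) := by
        split_ifs <;> omega
      have := ih _ hcur hINF i hi'
      have hle : (if h then 0 else if cur < INF then cur + 1 else INF) ≤ cur + 1 := by
        split_ifs <;> omega
      omega

theorem scanRec_ub (INF : Int) (t : List Bool) :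
    ∀ (cur : Int), 0 ≤ cur → 0 ≤ INF → ∀ j i, j ≤ i → i < t.length → t.getD j false = true →
      (ahB_scanRec INF cur t).getD i 0 ≤ (i : Int) - (j : Int) := by
  induction t with
  | nil => intro cur _ _ j i _ hi _; simp at hi
  | cons h t ih =>
    intro cur h0 hINF j i hj hi ht
    have hcur : (0:Int) ≤ (if h then 0 else if cur < INF then cur + 1 else INF) := by
      split_ifs <;> omega
    match j, i with
    | 0, 0 =>
      simp only [List.getD_cons_zero] at ht
      simp only [ahB_scanRec, List.getD_cons_zero, ht, if_true]
      omega
    | 0, Nat.succ i =>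
      simp only [List.getD_cons_zero] at ht
      simp only [ahB_scanRec, List.getD_cons_succ]
      have hi' : i < t.length := by simpa using hi
      have := scanRec_ub_carry INF t _ hcur hINF i hi'
      simp only [ht, if_true] at this ⊢
      omega
    | Nat.succ j, Nat.succ i =>
      simp only [List.getD_cons_succ] at ht
      simp only [ahB_scanRec, List.getD_cons_succ]
      have hi' : i < t.length := by simpa using hi
      have := ih _ hcur hINF j i (by omega) hi' ht
      omega

theorem scanRec_mem (INF : Int) (t : List Bool) :
    ∀ (cur : Int), 0 ≤ cur → cur ≤ INF → ∀ i < t.length,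
      (∃ j, j ≤ i ∧ t.getD j false = true ∧
          (ahB_scanRec INF cur t).getD i 0 = (i : Int) - (j : Int)) ∨
        (ahB_scanRec INF cur t).getD i 0 = INF ∨
        (ahB_scanRec INF cur t).getD i 0 = cur + 1 + i := by
  induction t with
  | nil => intro cur _ _ i hi; simp at hi
  | cons h t ih =>
    intro cur h0 hc i hi
    have hcur : (0:Int) ≤ (if h then 0 else if cur < INF then cur + 1 else INF) := by
      split_ifs <;> omega
    have hcur' : (if h then 0 else if cur < INF then cur + 1 else INF) ≤ INF := by
      split_ifs <;> omega
    match i with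
    | 0 =>
      simp only [ahB_scanRec, List.getD_cons_zero]
      by_cases hh : h
      · exact Or.inl ⟨0, le_refl _, by simpa using hh, by simp [hh]⟩
      · by_cases hlt : cur < INF
        · right; right; simp [hh, hlt]
        · right; left; simp [hh, hlt]
    | Nat.succ i =>
      simp only [ahB_scanRec, List.getD_cons_succ]
      have hi' : i < t.length := by simpa using hi
      rcases ih _ hcur hcur' i hi' with ⟨j, hj, ht, hv⟩ | hv | hv
      · exact Or.inl ⟨j + 1, by omega, by simpa using ht, by rw [hv]; push_cast; ring⟩
      · exact Or.inr (Or.inl hv)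
      · by_cases hh : h
        · refine Or.inl ⟨0, by omega, by simpa using hh, ?_⟩
          rw [hv]; simp [hh]; ring_nf
        · by_cases hlt : cur < INF
          · right; right; rw [hv]; simp [hh, hlt]; ring_nf
          · exfalso
            have hb := (scanRec_bounds INF t _ hcur hcur' i hi').2
            have hceq : (if h = true then 0 else if cur < INF then cur + 1 else INF) = INF := by
              simp [hh, hlt]
            rw [hceq] at hv hb
            omega

theorem getD_zipWith (f : Int → Int → Int) (a b : List Int) (i : Nat)
    (ha : i < a.length) (hb : i < b.length) :
    (List.zipWith f a b).getD i 0 = f (a.getD i 0) (b.getD i 0) := by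
  rw [List.getD_eq_getElem _ _ (by simp [List.length_zipWith]; omega),
      List.getD_eq_getElem _ _ ha, List.getD_eq_getElem _ _ hb]
  simp

theorem length_nearest (has : List Bool) (INF : Int) :
    (ahB_nearest has INF).length = has.length := by
  simp [ahB_nearest, scan_eq_rec, length_scanRec]

-- the Option-valued min fold, pushed through getD, with its range fact
theorem optmin_fold (i : Nat) (INF : Int) :
    ∀ (bw : List Nat) (m : Option Int),
      (m = none ∨ ∃ d, m = some d ∧ 0 ≤ d ∧ d < INF) →
      (∀ j ∈ bw, |(i : Int) - (j : Int)| < INF) →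
      ((bw.foldl (fun m (j : Nat) => ahO_min m (some |(i : Int) - (j : Int)|)) m).getD INF
          = bw.foldl (fun x (j : Nat) => min x |(i : Int) - (j : Int)|) (m.getD INF))
        ∧ (bw.foldl (fun m (j : Nat) => ahO_min m (some |(i : Int) - (j : Int)|)) m = none ∨
            ∃ d, bw.foldl (fun m (j : Nat) => ahO_min m (some |(i : Int) - (j : Int)|)) m = some d ∧
              0 ≤ d ∧ d < INF) := by
  intro bw
  induction bw with
  | nil =>
    intro m hm _
    exact ⟨rfl, hm⟩
  | cons j bw ih =>
    intro m hm hb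
    have hj : |(i : Int) - (j : Int)| < INF := hb j (by simp)
    have habs : 0 ≤ |(i : Int) - (j : Int)| := abs_nonneg _
    have hstep : ahO_min m (some |(i : Int) - (j : Int)|) = none ∨
        ∃ d, ahO_min m (some |(i : Int) - (j : Int)|) = some d ∧ 0 ≤ d ∧ d < INF := by
      rcases hm with hm | ⟨d, hm, hd0, hdI⟩
      · subst hm
        exact Or.inr ⟨_, rfl, habs, hj⟩
      · subst hm
        refine Or.inr ⟨_, rfl, ?_, ?_⟩
        · simp; omega
        · simp; omega
    have hgd : (ahO_min m (some |(i : Int) - (j : Int)|)).getD INF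
        = min (m.getD INF) |(i : Int) - (j : Int)| := by
      rcases hm with hm | ⟨d, hm, hd0, hdI⟩
      · subst hm
        simp [ahO_min, min_eq_right (le_of_lt hj)]
      · subst hm
        simp [ahO_min]
    have := ih (ahO_min m (some |(i : Int) - (j : Int)|)) hstep
      (fun j hj => hb j (by simp [hj]))
    refine ⟨?_, this.2⟩
    simpa [List.foldl_cons, hgd] using this.1

theorem minDist_S (bw : List Nat) (i : Nat) (INF : Int)
    (hb : ∀ j ∈ bw, |(i : Int) - (j : Int)| < INF) :
    ah_minDist bw i = none ∨
      ∃ d, ah_minDist bw i = some d ∧ 0 ≤ d ∧ d < INF :=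
  (optmin_fold i INF bw none (Or.inl rfl) hb).2

-- the Int-valued min fold is pinned down by the three min facts
theorem intmin_unique (bw : List Nat) (f : Nat → Int) (INF v : Int)
    (hle : v ≤ INF) (hall : ∀ j ∈ bw, v ≤ f j)
    (hmem : v = INF ∨ ∃ j ∈ bw, v = f j) :
    bw.foldl (fun x (j : Nat) => min x (f j)) INF = v := by
  rw [← List.foldl_map]
  have h1 := PySem.List.foldl_min_le (bw.map f) INF
  have h2 := PySem.List.foldl_min_mem (bw.map f) INF
  refine le_antisymm ?_ ?_
  · rcases hmem with hv | ⟨j, hjm, hv⟩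
    · rw [hv]; exact h1.1
    · rw [hv]; exact h1.2 (f j) (List.mem_map_of_mem hjm)
  · rcases h2 with h | h
    · rw [h]; exact hle
    · rcases List.mem_map.1 h with ⟨j, hjm, hfj⟩
      rw [← hfj]; exact hall j hjm

-- value of B's per-requirement sweep at one index, as the capped min over true indices
theorem nearest_eq (has : List Bool) (bw : List Nat) (INF : Int)
    (hmem : ∀ j, j ∈ bw ↔ j < has.length ∧ has.getD j false = true)
    (i : Nat) (hi : i < has.length) (hINF : (has.length : Int) ≤ INF) :
    (ahB_nearest has INF).getD i 0 = (ah_minDist bw i).getD INF := by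
  have hINF0 : (0 : Int) ≤ INF := le_trans (by positivity) hINF
  have hlf : (ahB_scanRec INF INF has).length = has.length := length_scanRec _ _ _
  have hlb : (ahB_scanRec INF INF has.reverse).length = has.length := by
    rw [length_scanRec]; simp
  have hri : has.length - 1 - i < has.length := by omega
  -- the two scan values at index i
  have hv : (ahB_nearest has INF).getD i 0
      = min ((ahB_scanRec INF INF has).getD i 0)
          ((ahB_scanRec INF INF has.reverse).getD (has.length - 1 - i) 0) := by
    rw [ahB_nearest, scan_eq_rec, scan_eq_rec,
      getD_zipWith min _ _ i (by omega) (by simp [hlb]; omega)]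
    congr 1
    rw [List.getD_eq_getElem _ _ (by simp [hlb]; omega),
      List.getD_eq_getElem _ _ (by omega)]
    simp [List.getElem_reverse, hlb]
  set a := (ahB_scanRec INF INF has).getD i 0 with ha
  set b := (ahB_scanRec INF INF has.reverse).getD (has.length - 1 - i) 0 with hbdef
  have hboundsa := scanRec_bounds INF has INF hINF0 le_rfl i (by omega)
  have hboundsb := scanRec_bounds INF has.reverse INF hINF0 le_rfl _ (by simpa using hri)
  have hrevget : ∀ j, j < has.length →
      has.reverse.getD (has.length - 1 - j) false = has.getD j false := by
    intro j hj
    rw [List.getD_eq_getElem _ _ (by simp; omega), List.getD_eq_getElem _ _ hj]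
    simp [List.getElem_reverse]
    congr 1
    omega
  have hdist : ∀ j ∈ bw, |(i : Int) - (j : Int)| < INF := by
    intro j hj
    have := (hmem j).1 hj
    refine abs_lt.mpr ⟨by omega, by omega⟩
  -- rewrite A's side as the plain Int min fold
  have hA := (optmin_fold i INF bw none (Or.inl rfl) hdist).1
  rw [ah_minDist, hA]
  rw [hv]
  refine (intmin_unique bw _ INF (min a b) ?_ ?_ ?_).symm
  · exact le_trans (min_le_left _ _) (hboundsa).2
  · -- below every candidate distance
    intro j hj
    obtain ⟨hjn, hjget⟩ := (hmem j).1 hj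
    by_cases hji : j ≤ i
    · have habs : |(i : Int) - (j : Int)| = (i : Int) - (j : Int) :=
        abs_of_nonneg (by omega)
      rw [habs]
      exact le_trans (min_le_left _ _)
        (scanRec_ub INF has INF hINF0 hINF0 j i hji (by omega) hjget)
    · have habs : |(i : Int) - (j : Int)| = (j : Int) - (i : Int) := by
        rw [abs_sub_comm]; exact abs_of_nonneg (by omega)
      rw [habs]
      have hub := scanRec_ub INF has.reverse INF hINF0 hINF0
        (has.length - 1 - j) (has.length - 1 - i) (by omega) (by simpa using hri)
        (by rw [hrevget j hjn]; exact hjget)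
      refine le_trans (min_le_right _ _) (le_trans hub (by omega))
  · -- the min is one of the candidates (or INF)
    rcases min_choice a b with hmab | hmab
    · rcases scanRec_mem INF has INF hINF0 le_rfl i (by omega) with
        ⟨j, hji, hjget, hval⟩ | hval | hval
      · refine Or.inr ⟨j, (hmem j).2 ⟨by omega, hjget⟩, ?_⟩
        rw [hmab, ha, hval]
        exact (abs_of_nonneg (by omega)).symm
      · exact Or.inl (by rw [hmab, ha, hval])
      · exfalso
        have := hboundsa.2
        rw [← ha] at this
        rw [← ha] at hval
        omega
    · rcases scanRec_mem INF has.reverse INF hINF0 le_rfl (has.length - 1 - i)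
          (by simpa using hri) with ⟨j', hji', hjget', hval⟩ | hval | hval
      · have hj'n : j' < has.length := by omega
        set j := has.length - 1 - j' with hjdef
        have hij : i ≤ j := by omega
        have hjn : j < has.length := by omega
        have hget : has.getD j false = true := by
          rw [← hrevget j hjn]
          have : has.length - 1 - j = j' := by omega
          rw [this]; exact hjget'
        refine Or.inr ⟨j, (hmem j).2 ⟨hjn, hget⟩, ?_⟩
        rw [hmab, hbdef, hval, abs_sub_comm, abs_of_nonneg (by omega)]
        omega
      · exact Or.inl (by rw [hmab, hbdef, hval])
      · exfalso
        have := hboundsb.2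
        rw [← hbdef] at this
        rw [← hbdef] at hval
        have : (0 : Int) ≤ ((has.length - 1 - i : Nat) : Int) := by positivity
        omega

-- ---- the blocks_with_req loop ----
theorem bw_mem (blocks : List (List (String × Bool))) (req : String) (j : Nat) :
    j ∈ ah_blocksWith blocks req ↔
      j < blocks.length ∧
        ((blocks.map (fun b => (b.lookup req).getD false)).getD j false = true) := by
  unfold ah_blocksWith
  rw [PySem.List.foldl_append_if]
  simp only [List.nil_append, List.mem_map, List.mem_filter,
    PySem.List.mem_enumerate_iff]
  constructor
  · rintro ⟨p, ⟨⟨k, hk, rfl⟩, hp⟩, rfl⟩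
    simp only at hp ⊢
    refine ⟨by simpa using hk, ?_⟩
    rw [List.getD_eq_getElem _ _ (by simpa using hk)]
    simpa using hp
  · rintro ⟨hj, hget⟩
    refine ⟨((j : Int), blocks[j]), ⟨⟨j, hj, by simp⟩, ?_⟩, by simp⟩
    rw [List.getD_eq_getElem _ _ (by simpa using hj)] at hget
    simpa using hget

-- ---- Option max layer: values are none (= inf) or distances in [0, INF) ----
def ahSp (INF : Int) (x : Option Int) : Prop :=
  x = none ∨ ∃ d, x = some d ∧ 0 ≤ d ∧ d < INF

theorem phi_nonneg (INF : Int) (x : Option Int) (h : ahSp INF x) (h0 : 0 ≤ INF) :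
    0 ≤ x.getD INF := by
  rcases h with h | ⟨d, h, hd0, hdI⟩ <;> subst h <;> simp <;> omega

theorem ahO_max_S (INF : Int) (m x : Option Int) (hm : ahSp INF m) (hx : ahSp INF x) :
    ahSp INF (ahO_max m x) := by
  rcases hm with hm | ⟨d, hm, hd0, hdI⟩ <;> rcases hx with hx | ⟨e, hx, he0, heI⟩ <;>
    subst hm <;> subst hx <;> simp [ahO_max, ahSp]
  exact ⟨by omega, by omega⟩

theorem ahO_max_phi (INF : Int) (m x : Option Int) (hm : ahSp INF m) (hx : ahSp INF x) :
    (ahO_max m x).getD INF = max (m.getD INF) (x.getD INF) := by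
  rcases hm with hm | ⟨d, hm, hd0, hdI⟩ <;> rcases hx with hx | ⟨e, hx, he0, heI⟩ <;>
    subst hm <;> subst hx <;> simp [ahO_max] <;> omega

theorem maxfold_S (INF : Int) (vals : List (Option Int)) :
    ∀ m, ahSp INF m → (∀ x ∈ vals, ahSp INF x) → ahSp INF (vals.foldl ahO_max m) := by
  induction vals with
  | nil => intro m hm _; exact hm
  | cons x vals ih =>
    intro m hm hv
    exact ih _ (ahO_max_S INF m x hm (hv x (by simp)))
      (fun y hy => hv y (by simp [hy]))

theorem maxfold_phi (INF : Int) (vals : List (Option Int)) :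
    ∀ m, ahSp INF m → (∀ x ∈ vals, ahSp INF x) →
      vals.foldl (fun a x => max a (x.getD INF)) (m.getD INF)
        = (vals.foldl ahO_max m).getD INF := by
  induction vals with
  | nil => intro m _ _; rfl
  | cons x vals ih =>
    intro m hm hv
    rw [List.foldl_cons, List.foldl_cons, ← ahO_max_phi INF m x hm (hv x (by simp))]
    exact ih _ (ahO_max_S INF m x hm (hv x (by simp))) (fun y hy => hv y (by simp [hy]))

theorem ahO_lt_phi (INF : Int) (x y : Option Int) (hx : ahSp INF x) (hy : ahSp INF y) :
    ahO_lt x y = decide (x.getD INF < y.getD INF) := by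
  rcases hx with hx | ⟨d, hx, hd0, hdI⟩ <;> rcases hy with hy | ⟨e, hy, he0, heI⟩ <;>
    subst hx <;> subst hy <;> simp [ahO_lt] <;> omega

-- ---- the final argmin loops agree ----
theorem argmin_fold (INF : Int) (MA MA' : Nat → Option Int) (f : Int → Int) (n : Nat)
    (hMAeq : ∀ k, k < n → MA' k = MA k)
    (hf : ∀ k, k < n → f (k : Int) = (MA k).getD INF)
    (hS : ∀ k, k < n → ahSp INF (MA k)) :
    ∀ (l : List Nat), (∀ k ∈ l, k < n) → ∀ (b : Nat), b < n →
      (l.foldl (fun (st : Int × Option Int) k =>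
          if ahO_lt (MA' k) st.2 then ((k : Int), MA' k) else st) ((b : Int), MA' b)).1
        = (l.map (fun (k : Nat) => (k : Int))).foldl
            (fun best i => if f i < f best then i else best) (b : Int) := by
  intro l
  induction l with
  | nil => intro _ b _; rfl
  | cons k l ih =>
    intro hl b hb
    have hk : k < n := hl k (by simp)
    have hcond : ahO_lt (MA' k) (MA' b) = decide (f (k : Int) < f (b : Int)) := by
      rw [hMAeq k hk, hMAeq b hb, hf k hk, hf b hb]
      exact ahO_lt_phi INF _ _ (hS k hk) (hS b hb)
    simp only [List.map_cons, List.foldl_cons, hcond]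
    by_cases hc : f (k : Int) < f (b : Int)
    · simp only [hc, decide_true, if_true]
      exact ih (fun j hj => hl j (by simp [hj])) k hk
    · simp only [hc, decide_false, if_false]
      exact ih (fun j hj => hl j (by simp [hj])) b hb

-- A's whole selection loop against B's, through the value correspondence
theorem argmin_whole (INF : Int) (MA MA' : Nat → Option Int) (f : Int → Int) (n : Nat)
    (hn : 0 < n)
    (hMAeq : ∀ k, k < n → MA' k = MA k)
    (hf : ∀ k, k < n → f (k : Int) = (MA k).getD INF)
    (hS : ∀ k, k < n → ahSp INF (MA k)) :
    ((List.range n).foldl (fun (st : Int × Option Int) k =>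
        if ahO_lt (MA' k) st.2 then ((k : Int), MA' k) else st) (0, none)).1
      = (PySem.List.pyRange 1 (n : Int) 1).foldl
          (fun best i => if f i < f best then i else best) 0 := by
  obtain ⟨m, rfl⟩ : ∃ m, n = m + 1 := ⟨n - 1, by omega⟩
  rw [List.range_succ_eq_map, List.foldl_cons]
  have h0 : (if ahO_lt (MA' 0) (((0 : Int), (none : Option Int))).2 then (((0 : Nat) : Int), MA' 0)
      else ((0 : Int), (none : Option Int))) = (((0 : Nat) : Int), MA' 0) := by
    cases h : MA' 0 <;> simp [ahO_lt]
  rw [h0]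
  rw [argmin_fold INF MA MA' f (m + 1) hMAeq hf hS _
    (by intro k hk; rcases List.mem_map.1 hk with ⟨j, hj, rfl⟩
        have := List.mem_range.1 hj; omega)
    0 (by omega)]
  have hlist : PySem.List.pyRange 1 (((m + 1 : Nat)) : Int) 1
      = ((List.range m).map Nat.succ).map (fun (k : Nat) => (k : Int)) := by
    rw [PySem.List.pyRange_one]
    have ht : ((((m + 1 : Nat)) : Int) - 1).toNat = m := by omega
    rw [ht, List.map_map]
    apply List.map_congr_left
    intro k _
    simp only [Function.comp_apply]
    omega
  rw [hlist]
  norm_num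

-- ---- B's running max over requirements, read at one index ----
theorem maxd_getD (blocks : List (List (String × Bool))) (INF : Int) (reqs : List String) :
    ∀ (acc : List Int), acc.length = blocks.length → ∀ i, i < blocks.length →
      ((reqs.foldl (fun maxd req =>
          List.zipWith max maxd
            (ahB_nearest (blocks.map (fun b => (b.lookup req).getD false)) INF)) acc).getD i 0
        = reqs.foldl (fun x req =>
            max x ((ahB_nearest (blocks.map (fun b => (b.lookup req).getD false)) INF).getD i 0))
            (acc.getD i 0)) := by
  induction reqs with
  | nil => intro acc _ i _; rfl
  | cons req reqs ih =>
    intro acc hacc i hi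
    have hlen : (ahB_nearest (blocks.map (fun b => (b.lookup req).getD false)) INF).length
        = blocks.length := by rw [length_nearest]; simp
    have hlz : (List.zipWith max acc
        (ahB_nearest (blocks.map (fun b => (b.lookup req).getD false)) INF)).length
        = blocks.length := by simp [List.length_zipWith, hacc, hlen]
    rw [List.foldl_cons, List.foldl_cons, ih _ hlz i hi,
      getD_zipWith max _ _ i (by omega) (by omega)]

-- ===== VERDICT (by name: the statement is the Claim_ definition above) =====
-- unwrap A's distance matrix at one block index
theorem MAo_eq (blocks : List (List (String × Bool))) (reqs : List String) (i : Nat)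
    (hi : i < blocks.length) :
    ahO_maxList ((List.range reqs.length).map (fun r =>
        (((reqs.map (fun req =>
            (List.range blocks.length).map (fun i => ah_minDist (ah_blocksWith blocks req) i))).getD r []).getD i none)))
      = ahO_maxList (reqs.map (fun req => ah_minDist (ah_blocksWith blocks req) i)) := by
  congr 1
  apply List.ext_getElem (by simp)
  intro r hr hr'
  have hrR : r < reqs.length := by simpa using hr
  simp only [List.getElem_map, List.getElem_range]
  have h1 : (List.map (fun req => List.map (fun i => ah_minDist (ah_blocksWith blocks req) i)
        (List.range blocks.length)) reqs).getD r []
      = List.map (fun i => ah_minDist (ah_blocksWith blocks reqs[r]) i)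
          (List.range blocks.length) := by
    rw [List.getD_eq_getElem _ _ (by simpa using hrR)]
    simp
  rw [h1, List.getD_eq_getElem _ _ (by simpa using hi)]
  simp

theorem apartment_hunting_spec : Claim_equal_apartment_hunting := by
  intro blocks reqs _
  unfold Spec_apartment_hunting
  by_cases hg : blocks = [] ∨ reqs = []
  · rcases hg with hg | hg <;> simp [apartment_hunting, apartment_hunting_alt, hg]
  · have hb : blocks ≠ [] := fun h => hg (Or.inl h)
    have hr : reqs ≠ [] := fun h => hg (Or.inr h)
    have hn1 : 0 < blocks.length := List.length_pos_of_ne_nil hb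
    obtain ⟨m, hm⟩ : ∃ m, blocks.length = m + 1 := ⟨blocks.length - 1, by omega⟩
    set n := blocks.length with hn
    set INF : Int := (n : Int) with hINFdef
    have hINF0 : (0 : Int) ≤ INF := by positivity
    set mv : String → Nat → Option Int :=
      fun req i => ah_minDist (ah_blocksWith blocks req) i with hmv
    set MA : Nat → Option Int :=
      fun i => ahO_maxList (reqs.map (fun req => mv req i)) with hMA
    -- distances appearing in A's min loop are in [0, INF)
    have hdist : ∀ (req : String) (i : Nat), i < n →
        ∀ j ∈ ah_blocksWith blocks req, |(i : Int) - (j : Int)| < INF := by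
      intro req i hi j hj
      have hjn := ((bw_mem blocks req j).1 hj).1
      exact abs_lt.mpr ⟨by omega, by omega⟩
    have hS_mv : ∀ (req : String) (i : Nat), i < n → ahSp INF (mv req i) := by
      intro req i hi
      exact minDist_S _ i INF (hdist req i hi)
    have hS_MA : ∀ i, i < n → ahSp INF (MA i) := by
      intro i hi
      obtain ⟨r0, rest, rfl⟩ := List.exists_cons_of_ne_nil hr
      have := maxfold_S INF (rest.map (fun req => mv req i)) (mv r0 i)
        (hS_mv r0 i hi) (by
          intro x hx
          rcases List.mem_map.1 hx with ⟨req, hreq, rfl⟩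
          exact hS_mv req i hi)
      rw [hMA]
      simpa only [List.map_cons, ahO_maxList] using this
    -- B's maxd value at one index is A's max through getD INF
    set maxd : List Int := reqs.foldl
      (fun maxd req =>
        List.zipWith max maxd
          (ahB_nearest (blocks.map (fun b => (b.lookup req).getD false)) INF))
      (List.replicate n (0 : Int)) with hmaxd
    have hnear : ∀ (req : String) (i : Nat), i < n →
        (ahB_nearest (blocks.map (fun b => (b.lookup req).getD false)) INF).getD i 0
          = (mv req i).getD INF := by
      intro req i hi
      have hlenh : (blocks.map (fun b => (b.lookup req).getD false)).length = n := by
        rw [List.length_map]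
      refine nearest_eq _ (ah_blocksWith blocks req) INF ?_ i (by omega) (by rw [hlenh])
      intro j
      rw [bw_mem blocks req j, hlenh]
    have hMB : ∀ i, i < n → maxd.getD i 0 = (MA i).getD INF := by
      intro i hi
      rw [hmaxd, maxd_getD blocks INF reqs _ (by simp only [List.length_replicate]; exact hn) i hi]
      obtain ⟨r0, rest, rfl⟩ := List.exists_cons_of_ne_nil hr
      rw [List.foldl_cons]
      have hrepl : (List.replicate n (0 : Int)).getD i 0 = 0 := by
        rw [List.getD_eq_getElem _ _ (by simpa using hi)]; simp
      rw [hrepl, hnear r0 i hi,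
        max_eq_right (phi_nonneg INF _ (hS_mv r0 i hi) hINF0)]
      have hcongr : rest.foldl (fun x req =>
            max x ((ahB_nearest (blocks.map (fun b => (b.lookup req).getD false)) INF).getD i 0))
            ((mv r0 i).getD INF)
          = rest.foldl (fun x req => max x ((mv req i).getD INF)) ((mv r0 i).getD INF) :=
        PySem.List.foldl_congr_mem _ _ _ _ (by intro acc req hreq; rw [hnear req i hi])
      rw [hcongr]
      have := maxfold_phi INF (rest.map (fun req => mv req i)) (mv r0 i)
        (hS_mv r0 i hi) (by
          intro x hx
          rcases List.mem_map.1 hx with ⟨req, hreq, rfl⟩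
          exact hS_mv req i hi)
      rw [List.foldl_map, List.foldl_map] at this
      rw [this, hMA]
      simp only [List.map_cons, ahO_maxList, List.foldl_map]
    -- unfold both programs and compare the selection loops
    simp only [apartment_hunting, apartment_hunting_alt, if_neg hg]
    exact argmin_whole INF MA _ _ n hn1
      (fun k hk => MAo_eq blocks reqs k (by omega))
      (fun k hk => by
        rw [show ((k : Nat) : Int) = ((k : Nat) : Int) from rfl]
        rw [PySem.List.pyGetD_natCast]
        exact hMB k hk)
      hS_MA
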